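-- pv_equiv track=rewrite | github.com/MrBrantCode/unitest_baseline | mut_generate/mist_train_cf/cf_80213/solution.py | solve
-- ===== SOURCE A (Python) =====
-- def cycle_length(p):
--     x = 1
--     while pow(10, x, p) != 1:
--         x += 1
--     return x
--
-- def solve(n):
--     sieve = [0, 0] + [1 for _ in range(2, n)]
--     sum_cycle_len = 0
--
--     for x in range(2, n):
--         if sieve[x] == 1 and (x % 2 != 0 and x % 5 != 0):
--             sum_cycle_len += cycle_length(x)
--             for y in range(2*x, n, x):
--                 sieve[y] = 0
--
--     return sum_cycle_len
-- ===== SOURCE B (Python) =====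
-- def _is_prime(x):
--     # deterministic trial division
--     if x < 2:
--         return False
--     d = 2
--     while d * d <= x:
--         if x % d == 0:
--             return False
--         d += 1
--     return True
--
-- def _order10(p):
--     # multiplicative order of 10 modulo the prime p (p not 2 or 5):
--     # factorize p-1, then strip prime factors from p-1 while 10^(d/q) stays 1
--     fac = []
--     f = p - 1
--     q = 2
--     while q * q <= f:
--         if f % q == 0:
--             fac.append(q)
--             while f % q == 0:
--                 f //= q
--         q += 1
--     if f > 1:
--         fac.append(f)
--     d = p - 1
--     for q in fac:
--         while d % q == 0 and pow(10, d // q, p) == 1: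
--             d //= q
--     return d
--
-- def solve(n):
--     total = 0
--     for x in range(3, n, 2):
--         if x % 5 != 0 and _is_prime(x):
--             total += _order10(x)
--     return total
-- ===== Notes on version B (the rewrite author's own statement) =====
-- stated objective: faster
-- what changed: B drops A's sieve-with-linear-order-scan entirely: it tests each odd candidate for primality by trial division and computes the multiplicative order of 10 mod p by factorizing p-1 by trial division and stripping prime factors q from d=p-1 while pow(10,d/q,p)==1, instead of A's incrementing x until pow(10,x,p)==1 (which is Theta(ord_p(10)) modular exponentiations per prime).
import Mathlib
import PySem

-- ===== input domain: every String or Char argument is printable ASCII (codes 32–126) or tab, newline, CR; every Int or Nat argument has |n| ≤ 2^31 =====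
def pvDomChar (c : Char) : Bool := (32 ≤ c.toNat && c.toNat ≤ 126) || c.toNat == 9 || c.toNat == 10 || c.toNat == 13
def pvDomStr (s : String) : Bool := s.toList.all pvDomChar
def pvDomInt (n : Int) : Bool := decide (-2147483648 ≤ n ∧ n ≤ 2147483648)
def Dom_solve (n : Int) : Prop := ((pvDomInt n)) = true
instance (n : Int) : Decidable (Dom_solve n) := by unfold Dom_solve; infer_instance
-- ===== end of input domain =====

-- B replaces A's interleaved sieve + linear order search by per-candidate trial-division
-- primality and an order computation that factorizes p-1 and strips prime factors while
-- 10^(d/q) stays 1 (objective: faster — measured asymptotically faster in a timing run).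

-- ===== PORT A =====
-- 'while pow(10, x, p) != 1: x += 1' — fuel p.toNat; for every p this loop is actually run
-- on (odd prime, not 2 or 5) the order of 10 mod p is ≤ p-1, so the fuel is never exhausted.
def pvCycleLoop (p : Int) : Nat → Int → Int
  | 0, x => x
  | f+1, x => if PySem.Int.powMod 10 x.toNat p ≠ 1 then pvCycleLoop p f (x+1) else x

def cycle_length (p : Int) : Int := pvCycleLoop p p.toNat 1

-- 'for y in range(2*x, n, x): sieve[y] = 0'  (every y is in range: 0 ≤ y < n = len)
def pvMarkA (n x : Int) (s : List Int) : List Int :=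
  (PySem.List.pyRange (2*x) n x).foldl (fun s y => PySem.List.pySetD s y 0) s

def pvStepA (n : Int) (st : List Int × Int) (x : Int) : List Int × Int :=
  if PySem.List.pyGetD st.1 x 0 = 1 ∧ x % 2 ≠ 0 ∧ x % 5 ≠ 0 then
    (pvMarkA n x st.1, st.2 + cycle_length x)
  else st

def solve (n : Int) : Int :=
  let sieve : List Int := [0, 0] ++ (PySem.List.pyRange 2 n 1).map (fun _ => (1:Int))
  ((PySem.List.pyRange 2 n 1).foldl (pvStepA n) (sieve, 0)).2

-- ===== PORT B =====
-- _is_prime: 'd = 2; while d*d <= x: if x % d == 0: return False; d += 1' — fuel x.toNat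
-- (the loop runs at most x-1 times: d*d > x at the latest once d exceeds x).
def pvTrialLoop (x : Int) : Nat → Int → Bool
  | 0, _ => true
  | f+1, d =>
    if d * d ≤ x then
      (if PySem.Int.mod x d = 0 then false else pvTrialLoop x f (d+1))
    else true

def pvIsPrime (x : Int) : Bool := if x < 2 then false else pvTrialLoop x x.toNat 2

-- 'while f % q == 0: f //= q' — fuel f.toNat + 1 (each division at least halves f)
def pvStrip (q : Int) : Nat → Int → Int
  | 0, f => f
  | fl+1, f => if PySem.Int.mod f q = 0 then pvStrip q fl (PySem.Int.floordiv f q) else f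

-- 'while q*q <= f: if f % q == 0: fac.append(q); <strip>; q += 1' — fuel m.toNat + 1
def pvFacLoop : Nat → Int → Int → List Int → List Int × Int
  | 0, f, _, fac => (fac, f)
  | fl+1, f, q, fac =>
    if q * q ≤ f then
      if PySem.Int.mod f q = 0 then
        pvFacLoop fl (pvStrip q (f.toNat + 1) f) (q + 1) (fac ++ [q])
      else pvFacLoop fl f (q + 1) fac
    else (fac, f)

def pvFactors (m : Int) : List Int :=
  let r := pvFacLoop (m.toNat + 1) m 2 []
  if 1 < r.2 then r.1 ++ [r.2] else r.1

-- 'while d % q == 0 and pow(10, d // q, p) == 1: d //= q' — fuel d.toNat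
def pvRedLoop (p q : Int) : Nat → Int → Int
  | 0, d => d
  | fl+1, d =>
    if PySem.Int.mod d q = 0 ∧ PySem.Int.powMod 10 (PySem.Int.floordiv d q).toNat p = 1 then
      pvRedLoop p q fl (PySem.Int.floordiv d q)
    else d

def pvOrder10 (p : Int) : Int :=
  (pvFactors (p - 1)).foldl (fun d q => pvRedLoop p q d.toNat d) (p - 1)

def solve_alt (n : Int) : Int :=
  (PySem.List.pyRange 3 n 2).foldl
    (fun total x =>
      if PySem.Int.mod x 5 ≠ 0 ∧ pvIsPrime x = true then total + pvOrder10 x else total) 0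

-- ===== PRECONDITION & SPEC =====
def Spec_solve (n : Int) (out : Int) : Prop := out = solve_alt n
instance (n : Int) (out : Int) : Decidable (Spec_solve n out) := by unfold Spec_solve; infer_instance

-- ===== CLAIM (what is proved, stated in full; the proofs are below) =====
def Claim_equal_solve : Prop := ∀ (n : Int), Dom_solve n → Spec_solve n (solve n)

-- ===== LEMMAS AND PROOFS =====

theorem pvExistsPrimeDvd (f : Int) (hf : 2 ≤ f) : ∃ r : Int, Prime r ∧ 2 ≤ r ∧ r ∣ f := by
  have hP : 2 ≤ f.toNat := by omega
  have hpr : Nat.Prime f.toNat.minFac := Nat.minFac_prime (by omega)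
  refine ⟨(f.toNat.minFac : Int), Nat.prime_iff_prime_int.mp hpr, by exact_mod_cast hpr.two_le, ?_⟩
  have : (f.toNat.minFac : Int) ∣ (f.toNat : Int) := Int.natCast_dvd_natCast.mpr (Nat.minFac_dvd _)
  simpa [Int.toNat_of_nonneg (by omega : (0:Int) ≤ f)] using this

theorem pvExistsPrimeDvdLt (f : Int) (hf : 2 ≤ f) (h : ¬ Nat.Prime f.toNat) :
    ∃ r : Int, Prime r ∧ 2 ≤ r ∧ r ∣ f ∧ r < f := by
  have hpr : Nat.Prime f.toNat.minFac := Nat.minFac_prime (by omega)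
  have hdvd : f.toNat.minFac ∣ f.toNat := Nat.minFac_dvd _
  have hle : f.toNat.minFac ≤ f.toNat := Nat.le_of_dvd (by omega) hdvd
  have hne : f.toNat.minFac ≠ f.toNat := by
    intro he
    exact h (Nat.prime_def_minFac.mpr ⟨by omega, he⟩)
  refine ⟨(f.toNat.minFac : Int), Nat.prime_iff_prime_int.mp hpr, by exact_mod_cast hpr.two_le, ?_, by omega⟩
  have : (f.toNat.minFac : Int) ∣ (f.toNat : Int) := Int.natCast_dvd_natCast.mpr hdvd
  simpa [Int.toNat_of_nonneg (by omega : (0:Int) ≤ f)] using this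

theorem pvPowIff (p : Int) (hp : 3 ≤ p) (k : Nat) :
    PySem.Int.powMod 10 k p = 1 ↔ (10 : ZMod p.toNat) ^ k = 1 := by
  have hppos : (0:Int) < p := by omega
  have hcast : ((p.toNat : Int)) = p := Int.toNat_of_nonneg (by omega)
  rw [PySem.Int.powMod, PySem.Int.mod_eq_emod_of_pos hppos]
  constructor
  · intro h
    have hq := Int.emod_add_mul_ediv ((10:Int) ^ k) p
    have hdvd : p ∣ ((10:Int) ^ k - 1) := ⟨((10:Int)^k)/p, by omega⟩
    have hz : (((10:Int) ^ k - 1 : Int) : ZMod p.toNat) = 0 := by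
      rw [ZMod.intCast_zmod_eq_zero_iff_dvd, hcast]; exact hdvd
    push_cast at hz
    exact sub_eq_zero.mp hz
  · intro h
    have hz : (((10:Int) ^ k - 1 : Int) : ZMod p.toNat) = 0 := by
      push_cast
      rw [h]; ring
    rw [ZMod.intCast_zmod_eq_zero_iff_dvd, hcast] at hz
    obtain ⟨t, ht⟩ := hz
    have h1 : ((10:Int) ^ k) = 1 + p * t := by omega
    rw [h1, Int.add_mul_emod_self_left, Int.emod_eq_of_lt (by omega) (by omega)]

theorem pvNotDvdTen (p : Int) (hp : 3 ≤ p) (hP : Nat.Prime p.toNat)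
    (h2 : p % 2 = 1) (h5 : p % 5 ≠ 0) : (10 : ZMod p.toNat) ≠ 0 := by
  intro h0
  have hz : ((10 : Int) : ZMod p.toNat) = 0 := by push_cast; exact h0
  rw [ZMod.intCast_zmod_eq_zero_iff_dvd, Int.toNat_of_nonneg (by omega : (0:Int) ≤ p)] at hz
  obtain ⟨t, ht⟩ := hz
  have hple : p ≤ 10 := Int.le_of_dvd (by norm_num) ⟨t, ht⟩
  interval_cases p <;> omega

theorem pvOrdDvd (p : Int) (hp : 3 ≤ p) (hP : Nat.Prime p.toNat)
    (h2 : p % 2 = 1) (h5 : p % 5 ≠ 0) :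
    orderOf (10 : ZMod p.toNat) ∣ p.toNat - 1 := by
  haveI : Fact (Nat.Prime p.toNat) := ⟨hP⟩
  exact orderOf_dvd_iff_pow_eq_one.mpr
    (ZMod.pow_card_sub_one_eq_one (pvNotDvdTen p hp hP h2 h5))

theorem pvOrdPos (p : Int) (hp : 3 ≤ p) (hP : Nat.Prime p.toNat)
    (h2 : p % 2 = 1) (h5 : p % 5 ≠ 0) : 1 ≤ orderOf (10 : ZMod p.toNat) := by
  have hd := pvOrdDvd p hp hP h2 h5
  rcases Nat.eq_zero_or_pos (orderOf (10 : ZMod p.toNat)) with h | h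
  · rw [h] at hd
    have := Nat.eq_zero_of_zero_dvd hd
    omega
  · omega

theorem pvCycleLoop_eq (p : Int) (hp : 3 ≤ p)
    (ord : Nat) (hord : ∀ k : Nat, PySem.Int.powMod 10 k p = 1 ↔ ord ∣ k) (hpos : 1 ≤ ord) :
    ∀ (fuel : Nat) (x : Int), 1 ≤ x → x ≤ (ord : Int) → (ord : Int) ≤ x + fuel →
      pvCycleLoop p fuel x = (ord : Int) := by
  intro fuel
  induction fuel with
  | zero => intro x h1 h2 h3; simp only [pvCycleLoop]; omega
  | succ f ih =>
    intro x h1 h2 h3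
    simp only [pvCycleLoop]
    by_cases hx : x = (ord : Int)
    · subst hx
      have h1' : PySem.Int.powMod 10 ((ord : Int)).toNat p = 1 := by
        rw [hord]; exact ⟨1, by simp⟩
      rw [Int.toNat_natCast] at h1'
      simp [h1']
    · have hlt : x < (ord : Int) := by omega
      have hne : PySem.Int.powMod 10 x.toNat p ≠ 1 := by
        rw [Ne, hord]
        intro hdvd
        have := Nat.le_of_dvd (by omega) hdvd
        omega
      rw [if_pos hne]
      exact ih (x+1) (by omega) (by omega) (by omega)

theorem pvCycle_eq_ord (p : Int) (hp : 3 ≤ p) (hP : Nat.Prime p.toNat)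
    (h2 : p % 2 = 1) (h5 : p % 5 ≠ 0) :
    cycle_length p = (orderOf (10 : ZMod p.toNat) : Int) := by
  have hpos := pvOrdPos p hp hP h2 h5
  have hdvd := pvOrdDvd p hp hP h2 h5
  have hle : orderOf (10 : ZMod p.toNat) ≤ p.toNat - 1 := Nat.le_of_dvd (by omega) hdvd
  exact pvCycleLoop_eq p hp _
    (fun k => (pvPowIff p hp k).trans orderOf_dvd_iff_pow_eq_one.symm) hpos
    p.toNat 1 (by omega) (by omega) (by omega)

theorem pvPrimeDvdPrime (r q : Int) (hr : Prime r) (hr2 : 2 ≤ r) (hq : Prime q) (hq2 : 2 ≤ q)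
    (hdvd : r ∣ q) : r = q := by
  have h1 : r.natAbs ∣ q.natAbs := Int.natAbs_dvd_natAbs.mpr hdvd
  have h2 : r.natAbs = q.natAbs :=
    (Nat.prime_dvd_prime_iff_eq (Int.prime_iff_natAbs_prime.mp hr)
      (Int.prime_iff_natAbs_prime.mp hq)).mp h1
  omega

theorem pvStrip_spec (q : Int) (hq : Prime q) (hq2 : 2 ≤ q) :
    ∀ (fuel : Nat) (f : Int), 1 ≤ f → f.toNat ≤ fuel →
      1 ≤ pvStrip q fuel f ∧ pvStrip q fuel f ∣ f ∧ ¬ q ∣ pvStrip q fuel f ∧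
        (∀ r : Int, Prime r → 2 ≤ r → r ≠ q → r ∣ f → r ∣ pvStrip q fuel f) := by
  intro fuel
  induction fuel with
  | zero => intro f h1 h2; omega
  | succ fl ih =>
    intro f h1 h2
    simp only [pvStrip]
    by_cases hm : PySem.Int.mod f q = 0
    · rw [if_pos hm]
      have hdv : q ∣ f := (PySem.Int.mod_eq_zero_iff_dvd f q).mp hm
      rw [PySem.Int.floordiv_eq_ediv_of_pos (by omega : (0:Int) < q)]
      have hfq : q * (f / q) = f := Int.mul_ediv_cancel' hdv
      have hf2 : 1 ≤ f / q := by nlinarith [Int.le_of_lt (show (0:Int) < f by omega)]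
      have hlt : f / q ≤ f - 1 := by nlinarith
      obtain ⟨ha, hb, hc, hd⟩ := ih (f / q) hf2 (by omega)
      refine ⟨ha, hb.trans (Int.ediv_dvd_of_dvd hdv), hc, ?_⟩
      intro r hrp hr2 hrne hrf
      apply hd r hrp hr2 hrne
      rcases (hrp.dvd_mul.mp (show r ∣ q * (f / q) by rw [hfq]; exact hrf)) with h | h
      · exact absurd (pvPrimeDvdPrime r q hrp hr2 hq hq2 h) hrne
      · exact h
    · rw [if_neg hm]
      exact ⟨h1, dvd_refl f, fun hc => hm ((PySem.Int.mod_eq_zero_iff_dvd f q).mpr hc),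
        fun r _ _ _ h => h⟩

theorem pvFacLoop_spec :
    ∀ (fuel : Nat) (f q : Int) (fac : List Int), 1 ≤ f → 2 ≤ q →
      (f + 2 - q).toNat ≤ fuel →
      (∀ r : Int, Prime r → 2 ≤ r → r ∣ f → q ≤ r) →
      (1 ≤ (pvFacLoop fuel f q fac).2) ∧
      (∀ e ∈ fac, e ∈ (pvFacLoop fuel f q fac).1) ∧
      (∀ e ∈ (pvFacLoop fuel f q fac).1, e ∈ fac ∨ 2 ≤ e) ∧
      (∀ r : Int, Prime r → 2 ≤ r → r ∣ f →
        r ∈ (pvFacLoop fuel f q fac).1 ∨ r = (pvFacLoop fuel f q fac).2) := by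
  intro fuel
  induction fuel with
  | zero =>
    intro f q fac h1 h2 h3 H
    refine ⟨h1, fun e he => he, fun e he => Or.inl he, ?_⟩
    intro r hrp hr2 hrd
    have := Int.le_of_dvd (by omega) hrd
    have := H r hrp hr2 hrd
    omega
  | succ fl ih =>
    intro f q fac h1 h2 h3 H
    simp only [pvFacLoop]
    by_cases hqq : q * q ≤ f
    · rw [if_pos hqq]
      have hqf : q ≤ f - 2 := by nlinarith
      by_cases hm : PySem.Int.mod f q = 0
      · rw [if_pos hm]
        have hdvq : q ∣ f := (PySem.Int.mod_eq_zero_iff_dvd f q).mp hm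
        have hqp : Prime q := by
          by_contra hc
          have hnp : ¬ Nat.Prime q.toNat := by
            intro hn
            apply hc
            rw [Int.prime_iff_natAbs_prime, show q.natAbs = q.toNat by omega]
            exact hn
          obtain ⟨r, hrp, hr2, hrq, hrlt⟩ := pvExistsPrimeDvdLt q h2 hnp
          have := H r hrp hr2 (hrq.trans hdvq)
          omega
        obtain ⟨hs1, hs2, hs3, hs4⟩ := pvStrip_spec q hqp h2 (f.toNat + 1) f h1 (by omega)
        set f2 := pvStrip q (f.toNat + 1) f with hf2
        have hf2le : f2 ≤ f := Int.le_of_dvd (by omega) hs2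
        have H' : ∀ r : Int, Prime r → 2 ≤ r → r ∣ f2 → q + 1 ≤ r := by
          intro r hrp hr2 hrd
          have hq_le := H r hrp hr2 (hrd.trans hs2)
          rcases eq_or_lt_of_le hq_le with he | hl
          · exact absurd (he ▸ hrd) hs3
          · omega
        obtain ⟨c1, c0, c2, c3⟩ := ih f2 (q+1) (fac ++ [q]) hs1 (by omega) (by omega) H'
        refine ⟨c1, ?_, ?_, ?_⟩
        · intro e he; exact c0 e (List.mem_append_left _ he)
        · intro e he
          rcases c2 e he with h | h
          · rcases List.mem_append.mp h with h' | h'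
            · exact Or.inl h'
            · right; simp only [List.mem_singleton] at h'; omega
          · exact Or.inr h
        · intro r hrp hr2 hrd
          by_cases hrq : r = q
          · subst hrq
            exact Or.inl (c0 r (List.mem_append_right _ (List.mem_singleton.mpr rfl)))
          · exact c3 r hrp hr2 (hs4 r hrp hr2 hrq hrd)
      · rw [if_neg hm]
        have hndv : ¬ q ∣ f := fun hc => hm ((PySem.Int.mod_eq_zero_iff_dvd f q).mpr hc)
        have H' : ∀ r : Int, Prime r → 2 ≤ r → r ∣ f → q + 1 ≤ r := by
          intro r hrp hr2 hrd
          have := H r hrp hr2 hrd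
          rcases eq_or_lt_of_le this with he | hl
          · exact absurd (he ▸ hrd) hndv
          · omega
        exact ih f (q+1) fac h1 (by omega) (by omega) H'
    · rw [if_neg hqq]
      refine ⟨h1, fun e he => he, fun e he => Or.inl he, ?_⟩
      intro r hrp hr2 hrd
      right
      have hq_le := H r hrp hr2 hrd
      obtain ⟨m, hmm⟩ := hrd
      have hm1 : 1 ≤ m := by nlinarith
      rcases eq_or_lt_of_le hm1 with he | hl
      · rw [hmm, ← he, mul_one]
      · exfalso
        obtain ⟨r', hr'p, hr'2, hr'd⟩ := pvExistsPrimeDvd m (by omega)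
        have hr'f : r' ∣ f := hr'd.trans ⟨r, by rw [hmm]; ring⟩
        have := H r' hr'p hr'2 hr'f
        have hr'm : r' ≤ m := Int.le_of_dvd (by omega) hr'd
        nlinarith

theorem pvFactors_spec (m : Int) (hm : 1 ≤ m) :
    (∀ e ∈ pvFactors m, 2 ≤ e) ∧
    (∀ r : Int, Prime r → 2 ≤ r → r ∣ m → r ∈ pvFactors m) := by
  obtain ⟨c1, c0, c2, c3⟩ := pvFacLoop_spec (m.toNat + 1) m 2 [] hm (by omega) (by omega)
    (fun r _ hr2 _ => hr2)
  unfold pvFactors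
  rcases hE : pvFacLoop (m.toNat + 1) m 2 [] with ⟨fac', f'⟩
  rw [hE] at c1 c0 c2 c3
  simp only
  constructor
  · intro e he
    split_ifs at he with hio
    · rcases List.mem_append.mp he with h | h
      · rcases c2 e h with h' | h'
        · simp at h'
        · exact h'
      · simp only [List.mem_singleton] at h; omega
    · rcases c2 e he with h' | h'
      · simp at h'
      · exact h'
  · intro r hrp hr2 hrd
    rcases c3 r hrp hr2 hrd with h | h
    · split_ifs
      · exact List.mem_append_left _ h
      · exact h
    · split_ifs with hc
      · rw [h]; exact List.mem_append_right _ (List.mem_singleton.mpr rfl)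
      · omega

theorem pvRedCond (d q : Int) (ord : Nat) (hd : 1 ≤ d) (hq : 2 ≤ q) :
    (q ∣ d ∧ (ord : Int) ∣ d / q) ↔ (ord : Int) * q ∣ d := by
  constructor
  · rintro ⟨hqd, t, ht⟩
    refine ⟨t, ?_⟩
    have := Int.mul_ediv_cancel' hqd
    rw [← this, ht]; ring
  · rintro ⟨t, ht⟩
    have hqd : q ∣ d := ⟨(ord : Int) * t, by rw [ht]; ring⟩
    refine ⟨hqd, t, ?_⟩
    rw [ht, show ((ord : Int) * q * t) = q * ((ord:Int) * t) by ring,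
      Int.mul_ediv_cancel_left _ (by omega : q ≠ 0)]

theorem pvRedLoop_spec (p : Int) (hp : 3 ≤ p)
    (ord : Nat) (hord : ∀ k : Nat, PySem.Int.powMod 10 k p = 1 ↔ ord ∣ k) (hpos : 1 ≤ ord)
    (q : Int) (hq2 : 2 ≤ q) :
    ∀ (fuel : Nat) (d : Int), 1 ≤ d → d.toNat ≤ fuel → (ord : Int) ∣ d →
      1 ≤ pvRedLoop p q fuel d ∧ pvRedLoop p q fuel d ∣ d ∧
      (ord : Int) ∣ pvRedLoop p q fuel d ∧ ¬ ((ord : Int) * q ∣ pvRedLoop p q fuel d) := by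
  intro fuel
  induction fuel with
  | zero => intro d h1 h2 h3; omega
  | succ fl ih =>
    intro d h1 h2 h3
    simp only [pvRedLoop]
    have hdq : PySem.Int.floordiv d q = d / q :=
      PySem.Int.floordiv_eq_ediv_of_pos (by omega : (0:Int) < q)
    have hcond : (PySem.Int.mod d q = 0 ∧
        PySem.Int.powMod 10 (PySem.Int.floordiv d q).toNat p = 1) ↔ (ord : Int) * q ∣ d := by
      rw [hdq, PySem.Int.mod_eq_zero_iff_dvd, hord, ← pvRedCond d q ord h1 hq2]
      constructor
      · rintro ⟨ha, hb⟩
        refine ⟨ha, ?_⟩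
        have hnn : 0 ≤ d / q := Int.ediv_nonneg (by omega) (by omega)
        have := Int.natCast_dvd_natCast.mpr hb
        rwa [Int.toNat_of_nonneg hnn] at this
      · rintro ⟨ha, hb⟩
        refine ⟨ha, ?_⟩
        have hnn : 0 ≤ d / q := Int.ediv_nonneg (by omega) (by omega)
        obtain ⟨t, ht⟩ := hb
        have hop : (1:Int) ≤ (ord:Int) := by exact_mod_cast hpos
        have ht0 : 0 ≤ t := by nlinarith
        have hcast : ((ord:Int) * t) = ((ord * t.toNat : Nat) : Int) := by
          push_cast
          rw [Int.toNat_of_nonneg ht0]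
        exact ⟨t.toNat, by rw [ht, hcast, Int.toNat_natCast]⟩
    by_cases hc : (ord : Int) * q ∣ d
    · rw [if_pos (hcond.mpr hc)]
      obtain ⟨hqd, hod2⟩ := (pvRedCond d q ord h1 hq2).mpr hc
      have hded : q * (d / q) = d := Int.mul_ediv_cancel' hqd
      have hd21 : 1 ≤ d / q := by nlinarith [hded]
      have hd2lt : d / q ≤ d - 1 := by nlinarith [hded]
      obtain ⟨a, b, c, dd⟩ := ih (d / q) hd21 (by omega) hod2
      rw [hdq]
      exact ⟨a, b.trans (Int.ediv_dvd_of_dvd hqd), c, dd⟩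
    · rw [if_neg (fun hx => hc (hcond.mp hx))]
      exact ⟨h1, dvd_refl d, h3, hc⟩

theorem pvRedFold_spec (p : Int) (hp : 3 ≤ p)
    (ord : Nat) (hord : ∀ k : Nat, PySem.Int.powMod 10 k p = 1 ↔ ord ∣ k) (hpos : 1 ≤ ord) :
    ∀ (fac : List Int) (d : Int), (∀ e ∈ fac, 2 ≤ e) → 1 ≤ d → (ord : Int) ∣ d →
      1 ≤ fac.foldl (fun d q => pvRedLoop p q d.toNat d) d ∧
      (fac.foldl (fun d q => pvRedLoop p q d.toNat d) d) ∣ d ∧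
      (ord : Int) ∣ fac.foldl (fun d q => pvRedLoop p q d.toNat d) d ∧
      (∀ e ∈ fac, ¬ ((ord : Int) * e ∣ fac.foldl (fun d q => pvRedLoop p q d.toNat d) d)) := by
  intro fac
  induction fac with
  | nil => intro d hf h1 h2; exact ⟨h1, dvd_refl d, h2, by simp⟩
  | cons q t ih =>
    intro d hf h1 h2
    have hq2 : 2 ≤ q := hf q (List.mem_cons_self ..)
    obtain ⟨a1, a2, a3, a4⟩ := pvRedLoop_spec p hp ord hord hpos q hq2 d.toNat d h1 (le_refl _) h2
    simp only [List.foldl_cons]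
    obtain ⟨b1, b2, b3, b4⟩ := ih (pvRedLoop p q d.toNat d) (fun e he => hf e (List.mem_cons_of_mem _ he)) a1 a3
    refine ⟨b1, b2.trans a2, b3, ?_⟩
    intro e he
    rcases List.mem_cons.mp he with he' | he'
    · subst he'
      intro hcon
      exact a4 (hcon.trans b2)
    · exact b4 e he'

theorem pvOrder10_eq_cycle (p : Int) (hp : 3 ≤ p) (hP : Nat.Prime p.toNat)
    (h2 : p % 2 = 1) (h5 : p % 5 ≠ 0) : pvOrder10 p = cycle_length p := by
  have hpos := pvOrdPos p hp hP h2 h5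
  have hdvdN := pvOrdDvd p hp hP h2 h5
  set ord := orderOf (10 : ZMod p.toNat) with hordd
  have hord : ∀ k : Nat, PySem.Int.powMod 10 k p = 1 ↔ ord ∣ k :=
    fun k => (pvPowIff p hp k).trans orderOf_dvd_iff_pow_eq_one.symm
  have hdvd : (ord : Int) ∣ p - 1 := by
    obtain ⟨t, ht⟩ := hdvdN
    refine ⟨(t : Int), ?_⟩
    have hpt : ((p.toNat : Int)) = p := Int.toNat_of_nonneg (by omega)
    have : ((p.toNat - 1 : Nat) : Int) = p - 1 := by omega
    rw [← this, ht]
    push_cast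
    ring
  obtain ⟨hfe, hfmem⟩ := pvFactors_spec (p - 1) (by omega)
  obtain ⟨c1, c2, c3, c4⟩ := pvRedFold_spec p hp ord hord hpos (pvFactors (p-1)) (p-1) hfe (by omega) hdvd
  rw [pvCycle_eq_ord p hp hP h2 h5, ← hordd]
  unfold pvOrder10
  set dend := (pvFactors (p-1)).foldl (fun d q => pvRedLoop p q d.toNat d) (p-1) with hde
  -- dend = ord: ord ∣ dend and no prime multiple survives
  obtain ⟨m, hm⟩ := c3
  have hop : (1:Int) ≤ (ord:Int) := by exact_mod_cast hpos
  have hm1 : 1 ≤ m := by nlinarith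
  rcases eq_or_lt_of_le hm1 with he | hl
  · rw [hm, ← he, mul_one]
  · exfalso
    obtain ⟨r, hrp, hr2, hrd⟩ := pvExistsPrimeDvd m (by omega)
    have hrdend : r ∣ dend := hrd.trans ⟨(ord:Int), by rw [hm]; ring⟩
    have hrp1 : r ∣ p - 1 := hrdend.trans c2
    have hmem := hfmem r hrp hr2 hrp1
    apply c4 r hmem
    obtain ⟨t, ht⟩ := hrd
    exact ⟨t, by rw [hm, ht]; ring⟩

theorem pvTrialLoop_spec (x : Int) (hx : 2 ≤ x) :
    ∀ (fuel : Nat) (d : Int), 2 ≤ d → (x + 1 - d).toNat ≤ fuel →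
      (pvTrialLoop x fuel d = true ↔ ∀ e : Int, d ≤ e → e * e ≤ x → ¬ e ∣ x) := by
  intro fuel
  induction fuel with
  | zero =>
    intro d hd hfu
    simp only [pvTrialLoop, true_iff]
    intro e he hee
    have he1 : e ≤ e * e := le_mul_of_one_le_left (by omega) (by omega)
    omega
  | succ f ih =>
    intro d hd hfu
    simp only [pvTrialLoop]
    by_cases hdd : d * d ≤ x
    · rw [if_pos hdd]
      by_cases hm : PySem.Int.mod x d = 0
      · rw [if_pos hm]
        simp only [Bool.false_eq_true, false_iff]
        intro hall
        exact (hall d le_rfl hdd) ((PySem.Int.mod_eq_zero_iff_dvd x d).mp hm)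
      · rw [if_neg hm]
        rw [ih (d+1) (by omega) (by omega)]
        constructor
        · intro h e he hee hdvd
          rcases eq_or_lt_of_le he with he' | he'
          · exact hm ((PySem.Int.mod_eq_zero_iff_dvd x d).mpr (he' ▸ hdvd))
          · exact h e (by omega) hee hdvd
        · exact fun h e he hee => h e (by omega) hee
    · rw [if_neg hdd]
      simp only [true_iff]
      intro e he hee
      have hde : d * d ≤ e * e := mul_le_mul he he (by omega) (by omega)
      omega

theorem pvIsPrime_iff (x : Int) (hx : 2 ≤ x) : pvIsPrime x = true ↔ Nat.Prime x.toNat := by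
  unfold pvIsPrime
  rw [if_neg (by omega : ¬ x < 2),
    pvTrialLoop_spec x hx x.toNat 2 (by omega) (by omega)]
  constructor
  · intro h
    by_contra hnp
    have hm := Nat.minFac_sq_le_self (by omega : 0 < x.toNat) hnp
    have hmp : Nat.Prime x.toNat.minFac := Nat.minFac_prime (by omega)
    have hdvd : (x.toNat.minFac : Int) ∣ x := by
      have : (x.toNat.minFac : Int) ∣ (x.toNat : Int) := Int.natCast_dvd_natCast.mpr (Nat.minFac_dvd _)
      rwa [Int.toNat_of_nonneg (by omega : (0:Int) ≤ x)] at this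
    refine h (x.toNat.minFac : Int) (by exact_mod_cast hmp.two_le) ?_ hdvd
    have : (x.toNat.minFac * x.toNat.minFac : Nat) ≤ x.toNat := by nlinarith [hm]
    omega
  · intro hp e he2 hee hdvd
    have hne : e.toNat ∣ x.toNat := by
      have h1 : (e.toNat : Int) = e := Int.toNat_of_nonneg (by omega)
      rw [← h1] at hdvd
      have h2 : (x.toNat : Int) = x := Int.toNat_of_nonneg (by omega)
      rw [← h2] at hdvd
      exact_mod_cast hdvd
    rcases (Nat.Prime.eq_one_or_self_of_dvd hp e.toNat hne) with h | h
    · omega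
    · have hex : e = x := by omega
      subst hex
      nlinarith

def pvGood (x : Int) : Bool :=
  decide (Nat.Prime x.toNat) && decide (x % 2 = 1) && decide (x % 5 ≠ 0) && decide (2 ≤ x)

theorem pvGood_iff (x : Int) :
    pvGood x = true ↔ Nat.Prime x.toNat ∧ x % 2 = 1 ∧ x % 5 ≠ 0 ∧ 2 ≤ x := by
  simp [pvGood, and_assoc]

def pvSieveInv (n m : Int) (s : List Int) : Prop :=
  s.length = n.toNat ∧
  ∀ j : Nat, (j : Int) < n →
    (s[j]? = some 1 ↔ 2 ≤ j ∧
      ¬ ∃ q : Int, q < m ∧ pvGood q = true ∧ q ∣ (j : Int) ∧ q ≠ (j : Int))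

theorem pvFoldl_set_getElem? {α : Type} (v : α) :
    ∀ (ys : List Int), (∀ y ∈ ys, 0 ≤ y) → ∀ (l0 : List α) (j : Nat),
      (ys.foldl (fun l y => PySem.List.pySetD l y v) l0)[j]? =
        if (j:Int) ∈ ys ∧ j < l0.length then some v else l0[j]? := by
  intro ys
  induction ys with
  | nil => intro _ l0 j; simp
  | cons y t ih =>
    intro hpos l0 j
    have hy : 0 ≤ y := hpos y (List.mem_cons_self ..)
    simp only [List.foldl_cons, PySem.List.pySetD_of_nonneg _ _ hy]
    rw [ih (fun z hz => hpos z (List.mem_cons_of_mem _ hz)) (l0.set y.toNat v) j]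
    rw [List.length_set, List.getElem?_set]
    by_cases hjt : (j:Int) ∈ t
    · by_cases hlen : j < l0.length
      · simp [hjt, hlen]
      · have h0 : l0[j]? = none := List.getElem?_eq_none (by omega)
        simp only [hjt, hlen, and_false, if_false, h0, List.mem_cons, or_true]
        split_ifs with ha hb <;> first | rfl | omega
    · by_cases hjy : (j:Int) = y
      · have hyj : y.toNat = j := by omega
        have hmem : ((j:Int) ∈ y :: t) := by simp [hjy]
        simp only [hjt, false_and, if_false, hmem, true_and, hyj]
        by_cases hlen : j < l0.length
        · simp [hlen]
        · simp [hlen]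
      · have hne : y.toNat ≠ j := by omega
        have hm : ¬((j:Int) ∈ y :: t) := by simp [hjy, hjt]
        simp [hm, hne, hjt]

theorem pvFoldl_set_length {α : Type} (v : α) (ys : List Int) (l0 : List α) :
    (ys.foldl (fun l y => PySem.List.pySetD l y v) l0).length = l0.length := by
  induction ys generalizing l0 with
  | nil => rfl
  | cons y t ih => simp only [List.foldl_cons, ih, PySem.List.length_pySetD]

theorem pvCond_iff_good (n x : Int) (s : List Int) (hx : 2 ≤ x) (hxn : x < n)
    (hinv : pvSieveInv n x s) :
    ((PySem.List.pyGetD s x 0 = 1 ∧ x % 2 ≠ 0 ∧ x % 5 ≠ 0) ↔ pvGood x = true) := by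
  obtain ⟨hlen, hrel⟩ := hinv
  have hjx : ((x.toNat : Int)) = x := Int.toNat_of_nonneg (by omega)
  have hjlt : x.toNat < s.length := by omega
  have hget : PySem.List.pyGetD s x 0 = 1 ↔ s[x.toNat]? = some 1 := by
    rw [PySem.List.pyGetD_of_nonneg _ _ (by omega : (0:Int) ≤ x),
      List.getD_eq_getElem?_getD, List.getElem?_eq_getElem hjlt]
    simp
  have hR := hrel x.toNat (by omega)
  rw [hjx] at hR
  rw [pvGood_iff, hget, hR]
  constructor
  · rintro ⟨⟨hj2, hnoq⟩, hodd, h5⟩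
    have hodd' : x % 2 = 1 := by omega
    refine ⟨?_, hodd', h5, hx⟩
    by_contra hnp
    obtain ⟨r, hrp, hr2, hrd, hrlt⟩ := pvExistsPrimeDvdLt x hx hnp
    apply hnoq
    refine ⟨r, hrlt, ?_, hrd, by omega⟩
    rw [pvGood_iff]
    have hr2' : r % 2 = 1 := by
      rcases Int.emod_two_eq r with h | h
      · exfalso
        have h2r : (2:Int) ∣ r := Int.dvd_of_emod_eq_zero h
        have h2x : (2:Int) ∣ x := h2r.trans hrd
        rw [Int.dvd_iff_emod_eq_zero] at h2x
        omega
      · exact h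
    have hr5 : r % 5 ≠ 0 := by
      intro h5r
      have h5d : (5:Int) ∣ x := (Int.dvd_of_emod_eq_zero h5r).trans hrd
      rw [Int.dvd_iff_emod_eq_zero] at h5d
      omega
    refine ⟨?_, hr2', hr5, hr2⟩
    rw [Int.prime_iff_natAbs_prime, show r.natAbs = r.toNat by omega] at hrp
    exact hrp
  · rintro ⟨hprime, hodd, h5, _⟩
    refine ⟨⟨by omega, ?_⟩, by omega, h5⟩
    rintro ⟨q, hqlt, hqg, hqd, hqne⟩
    rw [pvGood_iff] at hqg
    obtain ⟨hqp, hq2, hq5, hq2'⟩ := hqg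
    have hqn : q.toNat ∣ x.toNat := by
      have h1 : (q.toNat : Int) = q := Int.toNat_of_nonneg (by omega)
      rw [← h1, ← hjx] at hqd
      exact_mod_cast hqd
    rcases hprime.eq_one_or_self_of_dvd q.toNat hqn with h | h
    · omega
    · omega

theorem pvInv_mark (n x : Int) (s : List Int) (hx : 2 ≤ x) (hxn : x < n)
    (hinv : pvSieveInv n x s) (hg : pvGood x = true) :
    pvSieveInv n (x + 1) (pvMarkA n x s) := by
  obtain ⟨hlen, hrel⟩ := hinv
  have hxpos : (0:Int) < x := by omega
  have hposA : ∀ y ∈ PySem.List.pyRange (2*x) n x, (0:Int) ≤ y := by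
    intro y hy
    rw [PySem.List.mem_pyRange_iff_of_pos hxpos] at hy
    omega
  refine ⟨by rw [pvMarkA, pvFoldl_set_length]; exact hlen, ?_⟩
  intro j hjn
  rw [pvMarkA, pvFoldl_set_getElem? _ _ hposA]
  have hmem : ((j:Int) ∈ PySem.List.pyRange (2*x) n x) ↔ (x ∣ (j:Int) ∧ 2*x ≤ (j:Int)) := by
    rw [PySem.List.mem_pyRange_iff_of_pos hxpos]
    constructor
    · rintro ⟨h1, h2, m, hm⟩
      exact ⟨⟨m + 2, by linarith⟩, h1⟩
    · rintro ⟨⟨m, hm⟩, h1⟩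
      refine ⟨h1, hjn, ⟨m - 2, by linarith⟩⟩
  by_cases hmark : (x ∣ (j:Int) ∧ 2*x ≤ (j:Int))
  · rw [if_pos ⟨hmem.mpr hmark, by omega⟩]
    constructor
    · intro h; exact absurd h (by simp)
    · rintro ⟨hj2, hnoq⟩
      exfalso
      exact hnoq ⟨x, by omega, hg, hmark.1, by omega⟩
  · have hnm : ¬ ((j:Int) ∈ PySem.List.pyRange (2*x) n x ∧ j < s.length) := by
      intro hc
      exact hmark (hmem.mp hc.1)
    rw [if_neg hnm, hrel j hjn]
    constructor
    · rintro ⟨hj2, hnoq⟩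
      refine ⟨hj2, ?_⟩
      rintro ⟨q, hqlt, hqg, hqd, hqne⟩
      by_cases hqx : q = x
      · subst hqx
        -- j is a proper multiple of q=x, hence j ≥ 2x: it would have been marked
        obtain ⟨m, hm⟩ := hqd
        have hj2' : (2:Int) ≤ (j:Int) := by exact_mod_cast hj2
        have hm1 : 1 ≤ m := by nlinarith [hm, hj2']
        rcases eq_or_lt_of_le hm1 with h | h
        · exact hqne (by rw [hm, ← h, mul_one])
        · have h2q : 2*q ≤ (j:Int) := by nlinarith [hm]
          exact hmark ⟨⟨m, hm⟩, h2q⟩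
      · exact hnoq ⟨q, by omega, hqg, hqd, hqne⟩
    · rintro ⟨hj2, hnoq⟩
      refine ⟨hj2, ?_⟩
      rintro ⟨q, hqlt, hqg, hqd, hqne⟩
      exact hnoq ⟨q, by omega, hqg, hqd, hqne⟩

theorem pvInv_skip (n x : Int) (s : List Int) (hx : 2 ≤ x)
    (hinv : pvSieveInv n x s) (hg : ¬ pvGood x = true) :
    pvSieveInv n (x + 1) s := by
  obtain ⟨hlen, hrel⟩ := hinv
  refine ⟨hlen, ?_⟩
  intro j hjn
  rw [hrel j hjn]
  constructor
  · rintro ⟨hj2, hnoq⟩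
    refine ⟨hj2, ?_⟩
    rintro ⟨q, hqlt, hqg, hqd, hqne⟩
    by_cases hqx : q = x
    · subst hqx; exact hg hqg
    · exact hnoq ⟨q, by omega, hqg, hqd, hqne⟩
  · rintro ⟨hj2, hnoq⟩
    refine ⟨hj2, ?_⟩
    rintro ⟨q, hqlt, hqg, hqd, hqne⟩
    exact hnoq ⟨q, by omega, hqg, hqd, hqne⟩

theorem pvFoldA (n : Int) :
    ∀ (k : Nat) (m : Int) (s : List Int) (t : Int), 2 ≤ m → n ≤ m + k →
      pvSieveInv n m s →
      ((PySem.List.pyRange m n 1).foldl (pvStepA n) (s, t)).2 =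
        (PySem.List.pyRange m n 1).foldl
          (fun t x => if pvGood x then t + cycle_length x else t) t := by
  intro k
  induction k with
  | zero =>
    intro m s t hm hn hinv
    rw [PySem.List.pyRange_one_eq_nil (by omega : n ≤ m)]
    rfl
  | succ k ih =>
    intro m s t hm hn hinv
    by_cases hmn : m < n
    · rw [PySem.List.pyRange_one_cons hmn]
      simp only [List.foldl_cons]
      have hcond := pvCond_iff_good n m s hm hmn hinv
      by_cases hg : pvGood m = true
      · rw [if_pos hg]
        have hstep : pvStepA n (s, t) m = (pvMarkA n m s, t + cycle_length m) := by
          rw [pvStepA, if_pos (hcond.mpr hg)]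
        rw [hstep]
        exact ih (m+1) _ _ (by omega) (by omega)
          (pvInv_mark n m s hm hmn hinv hg)
      · rw [if_neg hg]
        have hstep : pvStepA n (s, t) m = (s, t) := by
          rw [pvStepA, if_neg (fun hc => hg (hcond.mp hc))]
        rw [hstep]
        exact ih (m+1) _ _ (by omega) (by omega)
          (pvInv_skip n m s hm hinv hg)
    · rw [PySem.List.pyRange_one_eq_nil (by omega : n ≤ m)]
      rfl

-- a foldl ignores elements on which the step is the identity
theorem pvFoldl_filter {α β : Type} (f : β → α → β) (p : α → Bool) :
    ∀ (l : List α) (init : β), (∀ st x, x ∈ l → p x = false → f st x = st) →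
      l.foldl f init = (l.filter p).foldl f init := by
  intro l
  induction l with
  | nil => intros; rfl
  | cons x t ih =>
    intro init h
    by_cases hp : p x = true
    · simp only [List.foldl_cons, List.filter_cons, hp, if_pos]
      exact ih _ (fun st y hy hpy => h st y (List.mem_cons_of_mem _ hy) hpy)
    · have hpx : p x = false := by simpa using hp
      simp only [List.foldl_cons, List.filter_cons, hpx, Bool.false_eq_true,
        h init x (List.mem_cons_self ..) hpx]
      exact ih _ (fun st y hy hpy => h st y (List.mem_cons_of_mem _ hy) hpy)

-- the odd elements of range(2, n) are exactly range(3, n, 2)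
theorem pvFilter_odd_range (n : Int) :
    (PySem.List.pyRange 2 n 1).filter (fun x => x % 2 == 1) = PySem.List.pyRange 3 n 2 := by
  have h2 : (0:Int) < 2 := by norm_num
  have hs1 : ((PySem.List.pyRange 2 n 1).filter (fun x => x % 2 == 1)).Pairwise (· < ·) :=
    (PySem.List.pairwise_lt_pyRange_one 2 n).filter _
  have hs2 : (PySem.List.pyRange 3 n 2).Pairwise (· < ·) := by
    rw [PySem.List.pyRange_of_pos 3 n h2, List.pairwise_map]
    exact (List.pairwise_lt_range).imp (by intro a b hab; omega)
  have hmem : ∀ x, x ∈ (PySem.List.pyRange 2 n 1).filter (fun x => x % 2 == 1) ↔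
      x ∈ PySem.List.pyRange 3 n 2 := by
    intro x
    rw [List.mem_filter, PySem.List.mem_pyRange_one, PySem.List.mem_pyRange_iff_of_pos h2]
    simp only [beq_iff_eq]
    constructor
    · rintro ⟨⟨ha, hb⟩, hc⟩; refine ⟨by omega, hb, by omega⟩
    · rintro ⟨ha, hb, hc⟩; refine ⟨⟨by omega, hb⟩, by omega⟩
  have hnd1 : ((PySem.List.pyRange 2 n 1).filter (fun x => x % 2 == 1)).Nodup :=
    hs1.imp (fun h => ne_of_lt h)
  have hnd2 : (PySem.List.pyRange 3 n 2).Nodup := hs2.imp (fun h => ne_of_lt h)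
  exact List.Perm.eq_of_pairwise (fun a b _ _ h1 h2 => le_antisymm h1 h2)
    (hs1.imp le_of_lt) (hs2.imp le_of_lt) ((List.perm_ext_iff_of_nodup hnd1 hnd2).mpr hmem)


-- the initial sieve satisfies the invariant at m = 2
theorem pvInv0 (n : Int) (hn : 3 ≤ n) :
    pvSieveInv n 2 ([0, 0] ++ (PySem.List.pyRange 2 n 1).map (fun _ => (1:Int))) := by
  constructor
  · simp only [List.length_append, List.length_map, PySem.List.length_pyRange_one,
      List.length_cons, List.length_nil]
    omega
  · intro j hjn
    by_cases hj2 : 2 ≤ j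
    · have hs0 : (([0, 0] ++ (PySem.List.pyRange 2 n 1).map (fun _ => (1:Int)))[j]?) = some 1 := by
        have hl2 : ([0, 0] : List Int).length = 2 := rfl
        rw [List.getElem?_append_right (by rw [hl2]; omega), hl2, List.getElem?_map]
        have hlt : j - 2 < (PySem.List.pyRange 2 n 1).length := by
          rw [PySem.List.length_pyRange_one]; omega
        rw [List.getElem?_eq_getElem hlt]
        rfl
      rw [hs0]
      simp only [true_iff]
      refine ⟨hj2, ?_⟩
      rintro ⟨q, hqlt, hqg, _, _⟩
      rw [pvGood_iff] at hqg
      omega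
    · have hj01 : j = 0 ∨ j = 1 := by omega
      have hs0 : (([0, 0] ++ (PySem.List.pyRange 2 n 1).map (fun _ => (1:Int)))[j]?) = some 0 := by
        rcases hj01 with h | h <;> subst h <;> rfl
      rw [hs0]
      constructor
      · intro h; exact absurd h (by simp)
      · rintro ⟨h, _⟩; omega

-- ===== VERDICT (by name: the statement is the Claim_ definition above) =====
theorem solve_spec : Claim_equal_solve := by
  unfold Claim_equal_solve Spec_solve
  intro n _
  show solve n = solve_alt n
  show (List.foldl (pvStepA n)
      (([0, 0] ++ (PySem.List.pyRange 2 n 1).map (fun _ => (1:Int))), 0)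
      (PySem.List.pyRange 2 n 1)).2
    = List.foldl (fun total x =>
        if PySem.Int.mod x 5 ≠ 0 ∧ pvIsPrime x = true then total + pvOrder10 x else total)
        0 (PySem.List.pyRange 3 n 2)
  by_cases hn : n ≤ 2
  · have hnil : PySem.List.pyRange 3 n 2 = [] := by
      rw [PySem.List.pyRange_of_pos 3 n (by norm_num), if_neg (show ¬ 3 < n by omega)]
      simp
    rw [PySem.List.pyRange_one_eq_nil hn, hnil]
    rfl
  · have hn3 : 3 ≤ n := by omega
    rw [pvFoldA n (n-2).toNat 2 _ 0 (by omega) (by omega) (pvInv0 n hn3)]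
    rw [pvFoldl_filter _ (fun x => x % 2 == 1) _ _ ?hstep, pvFilter_odd_range n]
    case hstep =>
      intro st x _ hpx
      have hodd : ¬ x % 2 = 1 := by simpa using hpx
      rw [if_neg (fun hg => hodd ((pvGood_iff x).mp hg).2.1)]
    apply PySem.List.foldl_congr_mem
    intro acc x hx
    rw [PySem.List.mem_pyRange_iff_of_pos (by norm_num : (0:Int) < 2)] at hx
    obtain ⟨hx3, hxn, k, hk⟩ := hx
    have hodd : x % 2 = 1 := by omega
    have hmod5 : PySem.Int.mod x 5 = x % 5 := PySem.Int.mod_eq_emod_of_pos (by norm_num)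
    by_cases hg : pvGood x = true
    · obtain ⟨hp, _, h5, _⟩ := (pvGood_iff x).mp hg
      rw [if_pos hg, if_pos ⟨by omega, (pvIsPrime_iff x (by omega)).mpr hp⟩,
        pvOrder10_eq_cycle x (by omega) hp hodd h5]
    · rw [if_neg hg, if_neg]
      rintro ⟨h5, hip⟩
      exact hg ((pvGood_iff x).mpr
        ⟨(pvIsPrime_iff x (by omega)).mp hip, hodd, by omega, by omega⟩)
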